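-- pv_equiv track=rewrite | github.com/khoinguyen-personal-git/Artificial_Intelligence_Python | Decision_Tree.py | countByAttr
-- ===== SOURCE A (Python) =====
-- def countByAttr(X,y,col):
--     dic = {}
--     for row, c in zip(X,y):
--         k = row[col]
--         if k not in dic:
--             dic[k] = {}
--         if c not in dic[k]:
--             dic[k][c] = 0
--         dic[k][c] += 1
--     return dic
-- ===== SOURCE B (Python) =====
-- def countByAttr(X, y, col):
--     # pass 1: flat counts of (attribute value, label) pairs, first-encounter order
--     pairs = [(row[col], c) for row, c in zip(X, y)]
--     counts = {}
--     for p in pairs: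
--         counts[p] = counts.get(p, 0) + 1
--     # pass 2: reshape the flat pair counts into the nested dict
--     result = {}
--     for (k, c), n in counts.items():
--         result.setdefault(k, {})[c] = n
--     return result
-- ===== Notes on version B (the rewrite author's own statement) =====
-- stated objective: alternative
-- what changed: A builds the nested dict in a single pass, incrementing dic[row[col]][c] per row; B makes two separately-shaped passes: it first builds a flat counter over the (row[col], c) pairs and then reshapes those pair counts into the nested dict via setdefault.
import Mathlib
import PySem

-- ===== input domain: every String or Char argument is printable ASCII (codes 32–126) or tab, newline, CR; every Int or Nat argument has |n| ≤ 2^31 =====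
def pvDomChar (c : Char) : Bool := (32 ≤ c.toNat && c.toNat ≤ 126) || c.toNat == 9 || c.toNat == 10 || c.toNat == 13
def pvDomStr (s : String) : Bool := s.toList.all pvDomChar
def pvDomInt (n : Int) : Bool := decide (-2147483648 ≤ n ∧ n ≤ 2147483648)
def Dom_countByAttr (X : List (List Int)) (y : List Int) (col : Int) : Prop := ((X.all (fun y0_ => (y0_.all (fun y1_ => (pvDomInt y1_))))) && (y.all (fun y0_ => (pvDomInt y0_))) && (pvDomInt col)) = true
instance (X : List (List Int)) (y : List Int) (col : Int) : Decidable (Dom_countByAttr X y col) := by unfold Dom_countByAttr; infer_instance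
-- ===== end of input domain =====

-- B replaces A's one-pass nested-dict increment by two separately-shaped passes (a flat
-- (attr,label) pair counter, then a reshape of the pair counts into the nested dict); objective: alternative.

-- ===== PORT A =====
-- one pass over zip(X, y): increment dic[row[col]][c] in a nested dict
def countByAttr (X : List (List Int)) (y : List Int) (col : Int) : List (Int × List (Int × Int)) :=
  ((X.zip y).foldl (fun d rc =>
      let k := (PySem.List.pyGet? rc.1 col).getD 0   -- row[col]; none (IndexError) is excluded by Pre_
      let d1 := if d.contains k then d else d.insert k PySem.Dict.empty          -- if k not in dic: dic[k] = {}
      let inner := d1.getD k PySem.Dict.empty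
      let inner1 := if inner.contains rc.2 then inner else inner.insert rc.2 0   -- if c not in dic[k]: dic[k][c] = 0
      d1.insert k (inner1.insert rc.2 (inner1.getD rc.2 0 + 1)))                 -- dic[k][c] += 1
    PySem.Dict.empty).items.map (fun kv => (kv.1, kv.2.items))

-- ===== PORT B =====
-- pass 1: flat counts of (row[col], c) pairs; pass 2: reshape the pair counts into the nested dict
def countByAttr_alt (X : List (List Int)) (y : List Int) (col : Int) : List (Int × List (Int × Int)) :=
  let pairs := (X.zip y).map (fun rc => ((PySem.List.pyGet? rc.1 col).getD 0, rc.2))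
  let counts := pairs.foldl (fun d p => d.insert p (d.getD p 0 + 1)) PySem.Dict.empty
  (counts.items.foldl (fun r q =>
      let r1 := r.setdefault q.1.1 PySem.Dict.empty                              -- result.setdefault(k, {})
      r1.insert q.1.1 ((r1.getD q.1.1 PySem.Dict.empty).insert q.1.2 q.2))       -- …[c] = n
    PySem.Dict.empty).items.map (fun kv => (kv.1, kv.2.items))

-- ===== PRECONDITION & SPEC =====
-- Pre_ excludes exactly the inputs where Python A raises IndexError: some row paired with a
-- label has no element at index col (Python indexing, negative indices allowed).
def Pre_countByAttr (X : List (List Int)) (y : List Int) (col : Int) : Prop :=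
  ∀ rc ∈ X.zip y, PySem.Raise.InRange rc.1.length col
instance (X : List (List Int)) (y : List Int) (col : Int) : Decidable (Pre_countByAttr X y col) := by unfold Pre_countByAttr; infer_instance
def pvWitness_countByAttr : List (List Int) × List Int × Int := ([[1, 7], [2, 7], [1, 8]], [0, 1, 0], 0)

def Spec_countByAttr (X : List (List Int)) (y : List Int) (col : Int) (out : List (Int × List (Int × Int))) : Prop := out = countByAttr_alt X y col
instance (X : List (List Int)) (y : List Int) (col : Int) (out : List (Int × List (Int × Int))) : Decidable (Spec_countByAttr X y col out) := by unfold Spec_countByAttr; infer_instance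

-- ===== CLAIM (what is proved, stated in full; the proofs are below) =====
def Claim_equal_countByAttr : Prop := ∀ (X : List (List Int)) (y : List Int) (col : Int), Dom_countByAttr X y col → Pre_countByAttr X y col → Spec_countByAttr X y col (countByAttr X y col)

-- ===== LEMMAS AND PROOFS =====

-- collapsed step of A's loop, over the precomputed (attribute value, label) pair
def stepA (d : PySem.Dict Int (PySem.Dict Int Int)) (p : Int × Int) : PySem.Dict Int (PySem.Dict Int Int) :=
  let inner := d.getD p.1 PySem.Dict.empty
  d.insert p.1 (inner.insert p.2 (inner.getD p.2 0 + 1))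

-- collapsed step of B's reshape loop, over one pair-count item ((k, c), n)
def stepB (r : PySem.Dict Int (PySem.Dict Int Int)) (q : (Int × Int) × Int) : PySem.Dict Int (PySem.Dict Int Int) :=
  r.insert q.1.1 ((r.getD q.1.1 PySem.Dict.empty).insert q.1.2 q.2)

theorem litA_eq (d : PySem.Dict Int (PySem.Dict Int Int)) (p : Int × Int) :
    (let d1 := if d.contains p.1 then d else d.insert p.1 PySem.Dict.empty
     let inner := d1.getD p.1 PySem.Dict.empty
     let inner1 := if inner.contains p.2 then inner else inner.insert p.2 0
     d1.insert p.1 (inner1.insert p.2 (inner1.getD p.2 0 + 1))) = stepA d p := by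
  by_cases h : d.contains p.1 = true
  · by_cases h2 : (d.getD p.1 PySem.Dict.empty).contains p.2 = true
    · simp [stepA, h, h2]
    · simp [stepA, h, h2, PySem.Dict.getD_insert_self, PySem.Dict.insert_insert_self,
        PySem.Dict.getD_of_not_contains _ _ (Bool.eq_false_iff.mpr h2)]
  · simp [stepA, h, PySem.Dict.getD_insert_self, PySem.Dict.contains_empty,
      PySem.Dict.insert_insert_self, PySem.Dict.getD_empty,
      PySem.Dict.getD_of_not_contains _ _ (Bool.eq_false_iff.mpr h)]

theorem litB_eq (r : PySem.Dict Int (PySem.Dict Int Int)) (q : (Int × Int) × Int) :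
    (let r1 := r.setdefault q.1.1 PySem.Dict.empty
     r1.insert q.1.1 ((r1.getD q.1.1 PySem.Dict.empty).insert q.1.2 q.2)) = stepB r q := by
  by_cases h : r.contains q.1.1 = true
  · simp [stepB, PySem.Dict.setdefault_of_contains _ _ h]
  · simp [stepB, PySem.Dict.setdefault_of_not_contains _ _ (Bool.eq_false_iff.mpr h),
      PySem.Dict.getD_insert_self, PySem.Dict.insert_insert_self,
      PySem.Dict.getD_of_not_contains _ _ (Bool.eq_false_iff.mpr h)]

theorem add_of_mem {α : Type} [BEq α] [LawfulBEq α] (s : List α) (x : α) (h : x ∈ s) :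
    PySem.Set.add s x = s := by
  simp [PySem.Set.add, h]

theorem add_of_not_mem {α : Type} [BEq α] [LawfulBEq α] (s : List α) (x : α) (h : x ∉ s) :
    PySem.Set.add s x = s ++ [x] := by
  simp [PySem.Set.add, h]

theorem ofList_append_singleton {α : Type} [BEq α] (l : List α) (x : α) :
    PySem.Set.ofList (l ++ [x]) = PySem.Set.add (PySem.Set.ofList l) x := by
  simp [PySem.Set.ofList_eq_foldl, List.foldl_append]

theorem getD_mk_map {ν : Type} (l : List Int) (g : Int → ν) (k : Int) (d0 : ν) :
    (PySem.Dict.mk (l.map (fun a => (a, g a)))).getD k d0 = if k ∈ l then g k else d0 := by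
  induction l with
  | nil => simp [PySem.Dict.getD, PySem.Dict.get?]
  | cons a t ih =>
    by_cases hak : a = k
    · subst hak; simp [PySem.Dict.getD, PySem.Dict.get?]
    · simp only [List.map_cons, PySem.Dict.getD, PySem.Dict.get?] at ih ⊢
      rw [List.find?_cons_of_neg (by simp [hak])]
      rw [ih]
      simp [Ne.symm hak]

theorem contains_mk_map {ν : Type} (l : List Int) (g : Int → ν) (k : Int) :
    (PySem.Dict.mk (l.map (fun a => (a, g a)))).contains k = decide (k ∈ l) := by
  rw [PySem.Dict.contains_eq_decide_mem_keys]
  simp [PySem.Dict.keys_mk, List.map_map, Function.comp]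

theorem insert_mk_map {ν : Type} (l : List Int) (g : Int → ν) (k : Int) (v : ν) :
    (PySem.Dict.mk (l.map (fun a => (a, g a)))).insert k v
      = PySem.Dict.mk ((PySem.Set.add l k).map (fun a => (a, if a = k then v else g a))) := by
  apply PySem.Dict.ext
  by_cases hk : k ∈ l
  · rw [PySem.Dict.items_insert_of_contains _ _ (by simp [hk])]
    rw [add_of_mem _ _ hk]
    simp only [List.map_map]
    apply List.map_congr_left
    intro a _
    by_cases hak : a = k
    · subst hak; simp
    · simp [hak]
  · rw [PySem.Dict.items_insert_of_not_contains _ _ (by rw [contains_mk_map]; simpa using hk)]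
    rw [add_of_not_mem _ _ hk]
    rw [List.map_append]
    congr 1
    · apply List.map_congr_left
      intro a ha
      have : a ≠ k := fun h => hk (h ▸ ha)
      simp [this]
    · simp

def ksF (ps : List (Int × Int)) : List Int := PySem.Set.ofList (ps.map Prod.fst)
def csF (ps : List (Int × Int)) (k : Int) : List Int :=
  PySem.Set.ofList ((ps.filter (fun p => p.1 == k)).map Prod.snd)
def GV (L : List (Int × Int)) (v : Int × Int → Int) (k : Int) : PySem.Dict Int Int :=
  PySem.Dict.mk ((csF L k).map (fun c => (c, v (k, c))))
def canonV (L : List (Int × Int)) (v : Int × Int → Int) : PySem.Dict Int (PySem.Dict Int Int) :=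
  PySem.Dict.mk ((ksF L).map (fun a => (a, GV L v a)))

theorem ksF_append (L : List (Int × Int)) (p : Int × Int) :
    ksF (L ++ [p]) = PySem.Set.add (ksF L) p.1 := by
  simp [ksF, ofList_append_singleton]

theorem csF_append (L : List (Int × Int)) (p : Int × Int) (a : Int) :
    csF (L ++ [p]) a = if p.1 = a then PySem.Set.add (csF L a) p.2 else csF L a := by
  by_cases h : p.1 = a
  · simp [csF, List.filter_append, h, ofList_append_singleton]
  · simp [csF, List.filter_append, h]

theorem mem_csF (L : List (Int × Int)) (k c : Int) : c ∈ csF L k ↔ (k, c) ∈ L := by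
  simp only [csF, PySem.Set.mem_ofList, List.mem_map, List.mem_filter, beq_iff_eq]
  constructor
  · rintro ⟨⟨k', c'⟩, ⟨hmem, hk⟩, hc⟩
    simp at hk hc; subst hk; subst hc; exact hmem
  · intro h; exact ⟨(k, c), ⟨h, rfl⟩, rfl⟩

theorem mem_ksF (L : List (Int × Int)) (a : Int) : a ∈ ksF L ↔ a ∈ L.map Prod.fst := by
  simp [ksF, PySem.Set.mem_ofList]

theorem csF_of_not_mem_ksF (L : List (Int × Int)) (k : Int) (h : k ∉ ksF L) : csF L k = [] := by
  have : L.filter (fun p => p.1 == k) = [] := by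
    rw [List.filter_eq_nil_iff]
    intro p hp hbeq
    exact h ((mem_ksF L k).mpr (List.mem_map.mpr ⟨p, hp, by simpa using hbeq⟩))
  simp [csF, this]

theorem insert_canonV (L : List (Int × Int)) (v w : Int × Int → Int) (k c : Int) (n : Int)
    (hn : n = w (k, c)) (hw : ∀ q, q ≠ (k, c) → w q = v q) :
    (canonV L v).insert k (((canonV L v).getD k PySem.Dict.empty).insert c n)
      = canonV (L ++ [(k, c)]) w := by
  unfold canonV
  rw [getD_mk_map]
  rw [insert_mk_map]
  rw [ksF_append]
  congr 1
  apply List.map_congr_left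
  intro a ha
  by_cases hak : a = k
  · subst hak
    rw [if_pos (by trivial)]
    congr 1
    by_cases hk : a ∈ ksF L
    · rw [if_pos hk]
      unfold GV
      rw [insert_mk_map]
      rw [csF_append]
      rw [if_pos (by trivial)]
      congr 1
      apply List.map_congr_left
      intro c' _
      by_cases hcc : c' = c
      · subst hcc; simp [hn]
      · simp [hcc, hw (a, c') (by simp [hcc])]
    · rw [if_neg hk]
      unfold GV
      rw [csF_append]
      rw [if_pos (by trivial)]
      rw [csF_of_not_mem_ksF L a hk]
      rw [add_of_not_mem _ _ (by simp)]
      subst hn; rfl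
  · rw [if_neg hak]
    congr 1
    unfold GV
    rw [csF_append]
    rw [if_neg (by simpa using Ne.symm hak)]
    congr 1
    apply List.map_congr_left
    intro c' _
    rw [hw (a, c') (by simp [hak])]

def canonD (ps : List (Int × Int)) : PySem.Dict Int (PySem.Dict Int Int) :=
  canonV ps (fun q => (ps.count q : Int))

theorem lemR (v : Int × Int → Int) : ∀ L : List (Int × Int),
    (L.map (fun p => (p, v p))).foldl stepB PySem.Dict.empty = canonV L v := by
  intro L
  induction L using List.reverseRecOn with
  | nil => rfl
  | append_singleton L p ih =>
    rw [List.map_append, List.foldl_append]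
    simp only [List.map_cons, List.map_nil, List.foldl_cons, List.foldl_nil]
    rw [ih]
    obtain ⟨k, c⟩ := p
    exact insert_canonV L v v k c (v (k, c)) rfl (fun _ _ => rfl)

theorem getD_canonV_count (ps : List (Int × Int)) (k c : Int) :
    ((canonV ps (fun q => (ps.count q : Int))).getD k PySem.Dict.empty).getD c 0
      = (ps.count (k, c) : Int) := by
  unfold canonV
  rw [getD_mk_map]
  by_cases hk : k ∈ ksF ps
  · rw [if_pos hk]
    unfold GV
    rw [getD_mk_map]
    by_cases hc : c ∈ csF ps k
    · rw [if_pos hc]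
    · rw [if_neg hc]
      have : (k, c) ∉ ps := fun h => hc ((mem_csF ps k c).mpr h)
      simp [List.count_eq_zero.mpr this]
  · rw [if_neg hk]
    have : (k, c) ∉ ps := fun h => hk ((mem_ksF ps k).mpr (List.mem_map.mpr ⟨(k, c), h, rfl⟩))
    simp [PySem.Dict.getD_empty, List.count_eq_zero.mpr this]

theorem lemA : ∀ ps : List (Int × Int), ps.foldl stepA PySem.Dict.empty = canonD ps := by
  intro ps
  induction ps using List.reverseRecOn with
  | nil => rfl
  | append_singleton ps p ih =>
    rw [List.foldl_append]
    simp only [List.foldl_cons, List.foldl_nil]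
    rw [ih]
    obtain ⟨k, c⟩ := p
    unfold canonD stepA
    show (canonV ps (fun q => (ps.count q : Int))).insert k
        (((canonV ps (fun q => (ps.count q : Int))).getD k PySem.Dict.empty).insert c
          (((canonV ps (fun q => (ps.count q : Int))).getD k PySem.Dict.empty).getD c 0 + 1)) = _
    rw [getD_canonV_count]
    exact insert_canonV ps _ _ k c _
      (by simp [List.count_append])
      (fun q hq => by
        have h0 : List.count q [(k, c)] = 0 := by simp [Ne.symm hq]
        simp [List.count_append, h0])

theorem ksF_ofList (ps : List (Int × Int)) : ksF (PySem.Set.ofList ps) = ksF ps := by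
  induction ps using List.reverseRecOn with
  | nil => rfl
  | append_singleton ps p ih =>
    rw [ofList_append_singleton]
    by_cases hp : p ∈ PySem.Set.ofList ps
    · rw [add_of_mem _ _ hp, ih, ksF_append,
        add_of_mem _ _ ((mem_ksF ps p.1).mpr (List.mem_map.mpr
          ⟨p, (PySem.Set.mem_ofList ps p).mp hp, rfl⟩))]
    · rw [add_of_not_mem _ _ hp, ksF_append, ih, ksF_append]

theorem csF_ofList (ps : List (Int × Int)) (k : Int) :
    csF (PySem.Set.ofList ps) k = csF ps k := by
  induction ps using List.reverseRecOn with
  | nil => rfl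
  | append_singleton ps p ih =>
    rw [ofList_append_singleton]
    by_cases hp : p ∈ PySem.Set.ofList ps
    · rw [add_of_mem _ _ hp, ih, csF_append]
      by_cases hk : p.1 = k
      · rw [if_pos hk]
        rw [add_of_mem _ _ ((mem_csF ps k p.2).mpr (by
          have := (PySem.Set.mem_ofList ps p).mp hp
          rwa [show (k, p.2) = p by rw [← hk]] ))]
      · rw [if_neg hk]
    · rw [add_of_not_mem _ _ hp, csF_append, ih, csF_append]

theorem lemB (ps : List (Int × Int)) :
    ((PySem.Dict.counter ps).items).foldl stepB PySem.Dict.empty = canonD ps := by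
  rw [PySem.Dict.items_counter]
  rw [lemR (fun p => (ps.count p : Int)) (PySem.Set.ofList ps)]
  unfold canonD canonV
  rw [ksF_ofList]
  congr 1
  apply List.map_congr_left
  intro a _
  unfold GV
  rw [csF_ofList]

-- both loops compute the canonical nested dict of the flat pair list
theorem countByAttr_eq_canon (X : List (List Int)) (y : List Int) (col : Int) :
    countByAttr X y col
      = (canonD ((X.zip y).map (fun rc => ((PySem.List.pyGet? rc.1 col).getD 0, rc.2)))).items.map
          (fun kv => (kv.1, kv.2.items)) := by
  unfold countByAttr
  have hfold : (X.zip y).foldl (fun d rc =>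
      let k := (PySem.List.pyGet? rc.1 col).getD 0
      let d1 := if d.contains k then d else d.insert k PySem.Dict.empty
      let inner := d1.getD k PySem.Dict.empty
      let inner1 := if inner.contains rc.2 then inner else inner.insert rc.2 0
      d1.insert k (inner1.insert rc.2 (inner1.getD rc.2 0 + 1))) PySem.Dict.empty
      = (X.zip y).foldl (fun d rc => stepA d ((PySem.List.pyGet? rc.1 col).getD 0, rc.2)) PySem.Dict.empty :=
    PySem.List.foldl_congr_mem _ _ _ _ (fun acc rc _ => litA_eq acc ((PySem.List.pyGet? rc.1 col).getD 0, rc.2))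
  rw [hfold, ← List.foldl_map, lemA]

theorem countByAttr_alt_eq_canon (X : List (List Int)) (y : List Int) (col : Int) :
    countByAttr_alt X y col
      = (canonD ((X.zip y).map (fun rc => ((PySem.List.pyGet? rc.1 col).getD 0, rc.2)))).items.map
          (fun kv => (kv.1, kv.2.items)) := by
  show ((PySem.Dict.counter ((X.zip y).map (fun rc => ((PySem.List.pyGet? rc.1 col).getD 0, rc.2)))).items.foldl
      (fun r q =>
        let r1 := r.setdefault q.1.1 PySem.Dict.empty
        r1.insert q.1.1 ((r1.getD q.1.1 PySem.Dict.empty).insert q.1.2 q.2))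
      PySem.Dict.empty).items.map (fun kv => (kv.1, kv.2.items)) = _
  have hfold := PySem.List.foldl_congr_mem
    ((PySem.Dict.counter ((X.zip y).map (fun rc => ((PySem.List.pyGet? rc.1 col).getD 0, rc.2)))).items)
    _ stepB PySem.Dict.empty
    (fun acc q _ => litB_eq acc q)
  rw [hfold, lemB]

-- ===== VERDICT (by name: the statement is the Claim_ definition above) =====
theorem countByAttr_spec : Claim_equal_countByAttr := by
  unfold Claim_equal_countByAttr
  intro X y col _ _
  unfold Spec_countByAttr
  rw [countByAttr_eq_canon, countByAttr_alt_eq_canon]
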